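-- pv_equiv track=rewrite | github.com/DynamicDevices/mcp-remote-testing | lab_testing/tools/file_transfer.py | _extract_scp_error
-- ===== SOURCE A (Python) =====
-- def _extract_scp_error(stderr_text: str) -> str:
--     """
--     Extract the actual error message from scp/ssh stderr output.
--     Filters out banners/motd and returns the actual error line.
--
--     Args:
--         stderr_text: Raw stderr output from scp/ssh command
--
--     Returns:
--         Clean error message
--     """
--     if not stderr_text:
--         return "Unknown error"
--
--     # Split into lines and filter out empty lines
--     error_lines = [line.strip() for line in stderr_text.split("\n") if line.strip()]
--
--     # Look for actual error lines (usually start with "scp:" or "ssh:")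
--     for line in reversed(error_lines):  # Check from end (most recent)
--         if line.startswith("scp:") or line.startswith("ssh:"):
--             return line
--
--     # If no scp/ssh prefix found, use the last non-empty line
--     if error_lines:
--         return error_lines[-1]
--
--     return "Unknown error"
-- ===== SOURCE B (Python) =====
-- def _extract_scp_error(stderr_text: str) -> str:
--     last_match = None
--     last_nonempty = None
--     for line in stderr_text.split("\n"):
--         s = line.strip()
--         if not s:
--             continue
--         last_nonempty = s
--         if s.startswith("scp:") or s.startswith("ssh:"):
--             last_match = s
--     if last_match is not None:
--         return last_match
--     if last_nonempty is not None:
--         return last_nonempty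
--     return "Unknown error"
-- ===== Notes on version B (the rewrite author's own statement) =====
-- stated objective: simpler
-- what changed: Single forward pass with two accumulators (last matching line, last non-empty line) replaces building a filtered list and scanning it in reverse; the empty-input special case disappears.
import Mathlib
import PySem

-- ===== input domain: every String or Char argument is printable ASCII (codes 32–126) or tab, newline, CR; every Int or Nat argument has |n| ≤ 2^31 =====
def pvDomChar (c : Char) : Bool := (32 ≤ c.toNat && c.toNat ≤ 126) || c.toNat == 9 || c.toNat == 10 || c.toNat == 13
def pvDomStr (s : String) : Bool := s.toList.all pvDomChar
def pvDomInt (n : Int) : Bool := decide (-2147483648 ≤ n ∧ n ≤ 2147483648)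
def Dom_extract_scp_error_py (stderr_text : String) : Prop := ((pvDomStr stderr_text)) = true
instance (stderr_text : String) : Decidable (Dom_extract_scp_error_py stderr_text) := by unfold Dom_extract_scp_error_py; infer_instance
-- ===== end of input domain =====

-- B replaces A's filtered intermediate list + reversed scan by one forward pass with two accumulators (simpler decomposition, same cost).

-- ===== PORT A =====
-- line.startswith("scp:") or line.startswith("ssh:")
def pvErrP (s : String) : Bool := PySem.Str.startswith s "scp:" || PySem.Str.startswith s "ssh:"

def extract_scp_error_py (stderr_text : String) : String :=
  if stderr_text = "" then "Unknown error"
  else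
    -- error_lines = [line.strip() for line in stderr_text.split("\n") if line.strip()]
    let error_lines : List String := (((PySem.Str.split? stderr_text "\n").getD []).map PySem.Str.strip).filter (fun l => l ≠ "")
    -- for line in reversed(error_lines): if startswith … : return line
    match error_lines.reverse.find? pvErrP with
    | some l => l
    | none =>
      -- if error_lines: return error_lines[-1]
      match error_lines.getLast? with
      | some l => l
      | none => "Unknown error"

-- ===== PORT B =====
def pvStepB (st : Option String × Option String) (line : String) : Option String × Option String :=
  let s := PySem.Str.strip line
  if s = "" then st
  else (if pvErrP s then some s else st.1, some s)

def extract_scp_error_py_alt (stderr_text : String) : String :=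
  let st : Option String × Option String := ((PySem.Str.split? stderr_text "\n").getD []).foldl pvStepB (none, none)
  match st.1 with
  | some l => l
  | none =>
    match st.2 with
    | some l => l
    | none => "Unknown error"

-- ===== PRECONDITION & SPEC =====
def Spec_extract_scp_error_py (stderr_text : String) (out : String) : Prop := out = extract_scp_error_py_alt stderr_text
instance (stderr_text : String) (out : String) : Decidable (Spec_extract_scp_error_py stderr_text out) := by unfold Spec_extract_scp_error_py; infer_instance

-- ===== CLAIM (what is proved, stated in full; the proofs are below) =====
def Claim_equal_extract_scp_error_py : Prop := ∀ (stderr_text : String), Dom_extract_scp_error_py stderr_text → Spec_extract_scp_error_py stderr_text (extract_scp_error_py stderr_text)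

-- ===== LEMMAS AND PROOFS =====

-- The fold's state is (last matching filtered line, last filtered line), seeded by the initial state.
lemma foldl_pvStepB (ls : List String) (m0 n0 : Option String) :
    ls.foldl pvStepB (m0, n0) =
      ((((ls.map PySem.Str.strip).filter (fun l => l ≠ "")).reverse.find? pvErrP).orElse (fun _ => m0),
       (((ls.map PySem.Str.strip).filter (fun l => l ≠ "")).getLast?).orElse (fun _ => n0)) := by
  induction ls generalizing m0 n0 with
  | nil => simp
  | cons l ls ih =>
    rw [List.foldl_cons, List.map_cons]
    by_cases hs : PySem.Str.strip l = ""
    · rw [List.filter_cons_of_neg (by simp [hs])]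
      have hstep : pvStepB (m0, n0) l = (m0, n0) := by simp [pvStepB, hs]
      rw [hstep, ih]
    · rw [List.filter_cons_of_pos (by simp [hs])]
      have hstep : pvStepB (m0, n0) l =
          (if pvErrP (PySem.Str.strip l) then some (PySem.Str.strip l) else m0,
           some (PySem.Str.strip l)) := by
        simp [pvStepB, hs]
      rw [hstep, ih]
      refine Prod.ext ?_ ?_
      · simp only [List.reverse_cons, List.find?_append]
        cases hf : ((ls.map PySem.Str.strip).filter (fun l => l ≠ "")).reverse.find? pvErrP with
        | some x => simp [Option.orElse]
        | none =>
          by_cases hp : pvErrP (PySem.Str.strip l) <;>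
            simp [Option.orElse, List.find?, hp]
      · cases hg : (ls.map PySem.Str.strip).filter (fun l => l ≠ "") with
        | nil => simp [Option.orElse]
        | cons a t =>
          cases hy : (a :: t).getLast? with
          | none => simp at hy
          | some y => simp [List.getLast?_cons_cons, hy, Option.orElse]

lemma extract_eq (stderr_text : String) :
    extract_scp_error_py stderr_text = extract_scp_error_py_alt stderr_text := by
  by_cases h : stderr_text = ""
  · subst h; rfl
  · unfold extract_scp_error_py extract_scp_error_py_alt
    rw [if_neg h, foldl_pvStepB]
    simp only [ne_eq, decide_not]
    generalize ((((PySem.Str.split? stderr_text "\n").getD []).map PySem.Str.strip).filter (fun l => !decide (l = ""))).reverse.find? pvErrP = F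
    generalize ((((PySem.Str.split? stderr_text "\n").getD []).map PySem.Str.strip).filter (fun l => !decide (l = ""))).getLast? = G
    cases F <;> cases G <;> simp [Option.orElse]

-- ===== VERDICT (by name: the statement is the Claim_ definition above) =====
theorem extract_scp_error_py_spec : Claim_equal_extract_scp_error_py := by
  intro s _
  exact extract_eq s
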